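-- pv_equiv track=rewrite | github.com/fran-cab/codility_solutions | L07-Stacks and Queues/stone_wall.py | solution
-- ===== SOURCE A (Python) =====
-- from collections import deque
--
-- def solution(h: list) -> int:
--     """
--     >>> solution([3])
--     1
--     >>> solution([8, 8, 5, 7, 9, 8, 7, 4, 8])
--     7
--     """
--     stones = 0
--     stack = deque([0])
--     for h in h:
--         while stack[-1] > h:
--             stack.pop()
--         if stack[-1] < h:
--             stack.append(h)
--             stones += 1
--     return stones
-- ===== SOURCE B (Python) =====
-- def solution(h: list) -> int:
--     count = 0
--     prev = []  # heights already seen, in order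
--     for x in h:
--         if x > 0:
--             needed = True
--             for y in reversed(prev):  # scan back: most recent first
--                 if y <= x:
--                     needed = y < x
--                     break
--             if needed:
--                 count += 1
--         prev.append(x)
--     return count
-- ===== Notes on version B (the rewrite author's own statement) =====
-- stated objective: alternative
-- what changed: Replaces the monotonic-stack single pass by a stackless quadratic scan: for each positive height it looks back through the already-seen heights for the first one not above it and lays a block unless that height is equal.
-- outside the precondition, e.g. on solution([-1]): A raises IndexError, B returns 0
import Mathlib
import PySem

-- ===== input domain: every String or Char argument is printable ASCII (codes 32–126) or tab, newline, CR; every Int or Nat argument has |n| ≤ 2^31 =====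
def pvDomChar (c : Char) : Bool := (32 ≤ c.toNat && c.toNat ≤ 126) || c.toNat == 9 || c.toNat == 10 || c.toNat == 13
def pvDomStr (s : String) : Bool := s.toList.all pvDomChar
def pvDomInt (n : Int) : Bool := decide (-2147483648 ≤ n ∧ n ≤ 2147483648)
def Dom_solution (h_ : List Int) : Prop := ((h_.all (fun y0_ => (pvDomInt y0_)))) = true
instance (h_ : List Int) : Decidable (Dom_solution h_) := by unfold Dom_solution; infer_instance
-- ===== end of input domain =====

-- B replaces A's monotonic-stack single pass by a stackless quadratic back-scan over the
-- already-seen heights (objective: alternative; B is not faster).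


-- ===== PORT A =====
-- Python's `while stack[-1] > h: stack.pop()`; the stack is a List Int with its TOP AT THE HEAD
-- (deque append = cons, pop = tail, stack[-1] = head).  On the empty stack Python raises
-- IndexError; under Pre_solution (all heights ≥ 0) the bottom 0 is never popped, so the
-- `[] => []` branch is unreachable there.
def popWhile (h : Int) : List Int → List Int
  | [] => []
  | t :: rest => if t > h then popWhile h rest else t :: rest

def solution (h_ : List Int) : Int :=
  (h_.foldl (fun (st : List Int × Int) h =>
      let stack := popWhile h st.1
      if stack.headD 0 < h then (h :: stack, st.2 + 1) else (stack, st.2))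
    ([0], 0)).2

-- ===== PORT B =====
-- `for y in prev: if y <= x: needed = y < x; break` — prev holds the seen heights, most recent first.
def needsAux (x : Int) : List Int → Bool
  | [] => true
  | y :: rest => if y ≤ x then decide (y < x) else needsAux x rest

def altGo : List Int → List Int → Int → Int
  | [], _, count => count
  | x :: rest, prev, count =>
      altGo rest (x :: prev)
        (if x > 0 then (if needsAux x prev then count + 1 else count) else count)

def solution_alt (h_ : List Int) : Int := altGo h_ [] 0

-- ===== PRECONDITION & SPEC =====
-- Pre_ excludes lists containing a negative height: there A pops the sentinel 0 and raises
-- IndexError on `stack[-1]`; it admits every input on which A returns.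
def Pre_solution (h_ : List Int) : Prop := ∀ x ∈ h_, 0 ≤ x
instance (h_ : List Int) : Decidable (Pre_solution h_) := by unfold Pre_solution; infer_instance
def pvWitness_solution : List Int := ([8, 8, 5, 7, 9, 8, 7, 4, 8])

def Spec_solution (h_ : List Int) (out : Int) : Prop := out = solution_alt h_
instance (h_ : List Int) (out : Int) : Decidable (Spec_solution h_ out) := by unfold Spec_solution; infer_instance

-- ===== CLAIM (what is proved, stated in full; the proofs are below) =====
def Claim_equal_solution : Prop := ∀ (h_ : List Int), Dom_solution h_ → Pre_solution h_ → Spec_solution h_ (solution h_)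

-- ===== LEMMAS AND PROOFS =====

-- the stack A holds after having consumed the reversed prefix `r` (most recent first)
def stackOf : List Int → List Int
  | [] => [0]
  | y :: r =>
      let s := popWhile y (stackOf r)
      if s.headD 0 < y then y :: s else s

theorem popWhile_popWhile {x y : Int} (hxy : x ≤ y) (s : List Int) :
    popWhile x (popWhile y s) = popWhile x s := by
  induction s with
  | nil => rfl
  | cons t rest ih =>
    by_cases h : t > y
    · simp [popWhile, h, show t > x by omega, ih]
    · simp [popWhile, h]

theorem headD_popWhile_le {x : Int} (hx : 0 ≤ x) (s : List Int) :
    (popWhile x s).headD 0 ≤ x := by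
  induction s with
  | nil => simpa [popWhile]
  | cons t rest ih =>
    by_cases h : t > x
    · simpa [popWhile, h] using ih
    · simp [popWhile, h]; omega

-- the top of A's stack after popping everything above x, as a recursion on the reversed prefix
theorem headD_popWhile_stackOf (x : Int) (hx : 0 ≤ x) (r : List Int) (hr : ∀ y ∈ r, 0 ≤ y) :
    (popWhile x (stackOf r)).headD 0 =
      (match r with
       | [] => 0
       | y :: r' => if y ≤ x then y else (popWhile x (stackOf r')).headD 0) := by
  match r with
  | [] => simp [stackOf, popWhile, show ¬ (0 > x) by omega]
  | y :: r' =>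
    have hy : 0 ≤ y := hr y (by simp)
    show (popWhile x (stackOf (y :: r'))).headD 0 =
      if y ≤ x then y else (popWhile x (stackOf r')).headD 0
    have htop : (popWhile y (stackOf r')).headD 0 ≤ y := headD_popWhile_le hy (stackOf r')
    simp only [stackOf]
    generalize hs : popWhile y (stackOf r') = s at htop ⊢
    by_cases hle : y ≤ x
    · rw [if_pos hle]
      by_cases hpush : s.headD 0 < y
      · rw [if_pos hpush]
        rw [show popWhile x (y :: s) = y :: s from by
          simp [popWhile, show ¬ (y > x) by omega]]
        rfl
      · rw [if_neg hpush]
        have heq : s.headD 0 = y := by omega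
        match s with
        | [] =>
          have hy0 : y = 0 := by simpa using heq.symm
          simp [popWhile, hy0]
        | t :: s' =>
          have ht : t = y := by simpa using heq
          rw [show popWhile x (t :: s') = t :: s' from by
            simp [popWhile, ht, show ¬ (y > x) by omega]]
          simp [ht]
    · rw [if_neg hle]
      by_cases hpush : s.headD 0 < y
      · rw [if_pos hpush]
        rw [show popWhile x (y :: s) = popWhile x s from by
          simp [popWhile, show y > x by omega]]
        rw [← hs, popWhile_popWhile (by omega : x ≤ y)]
      · rw [if_neg hpush, ← hs, popWhile_popWhile (by omega : x ≤ y)]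

theorem top_lt_iff_needs (x : Int) (hx : 0 ≤ x) (r : List Int) (hr : ∀ y ∈ r, 0 ≤ y) :
    ((popWhile x (stackOf r)).headD 0 < x) ↔ (0 < x ∧ needsAux x r = true) := by
  induction r with
  | nil =>
    rw [headD_popWhile_stackOf x hx [] hr]
    simp [needsAux]
  | cons y r' ih =>
    have hy : 0 ≤ y := hr y (by simp)
    have hr' : ∀ z ∈ r', 0 ≤ z := fun z hz => hr z (by simp [hz])
    rw [headD_popWhile_stackOf x hx (y :: r') hr]
    show (if y ≤ x then y else (popWhile x (stackOf r')).headD 0) < x ↔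
      0 < x ∧ needsAux x (y :: r') = true
    by_cases hle : y ≤ x
    · rw [if_pos hle]
      constructor
      · intro h
        refine ⟨by omega, ?_⟩
        simp [needsAux, hle]; omega
      · rintro ⟨h1, h2⟩
        simp [needsAux, hle] at h2; omega
    · rw [if_neg hle, ih hr']
      have hn : needsAux x (y :: r') = needsAux x r' := by simp [needsAux, hle]
      rw [hn]

theorem main_loop (rest : List Int) : ∀ (r : List Int) (count : Int),
    (∀ y ∈ r, 0 ≤ y) → (∀ y ∈ rest, 0 ≤ y) →
    (rest.foldl (fun (st : List Int × Int) h =>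
        let stack := popWhile h st.1
        if stack.headD 0 < h then (h :: stack, st.2 + 1) else (stack, st.2))
      (stackOf r, count)).2 = altGo rest r count := by
  induction rest with
  | nil => intro r count _ _; rfl
  | cons x rest' ih =>
    intro r count hr hrest
    have hx : 0 ≤ x := hrest x (by simp)
    have hrest' : ∀ y ∈ rest', 0 ≤ y := fun y hy => hrest y (by simp [hy])
    have hxr : ∀ y ∈ x :: r, 0 ≤ y := by
      intro y hy
      rcases List.mem_cons.mp hy with h | h
      · omega
      · exact hr y h
    simp only [List.foldl_cons, altGo]
    have hinit : (if (popWhile x (stackOf r)).headD 0 < x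
            then (x :: popWhile x (stackOf r), count + 1)
            else (popWhile x (stackOf r), count)) =
         (stackOf (x :: r),
          if x > 0 then (if needsAux x r then count + 1 else count) else count) := by
      by_cases hlt : (popWhile x (stackOf r)).headD 0 < x
      · obtain ⟨hpos, hneed⟩ := (top_lt_iff_needs x hx r hr).mp hlt
        rw [if_pos hlt, if_pos hpos, if_pos hneed]
        rw [show stackOf (x :: r) = x :: popWhile x (stackOf r) from by
          simp only [stackOf]; rw [if_pos hlt]]
      · rw [if_neg hlt]
        rw [show stackOf (x :: r) = popWhile x (stackOf r) from by
          simp only [stackOf]; rw [if_neg hlt]]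
        by_cases hpos : x > 0
        · have hneed : needsAux x r = false := by
            cases hnx : needsAux x r
            · rfl
            · exact absurd ((top_lt_iff_needs x hx r hr).mpr ⟨hpos, hnx⟩) hlt
          rw [if_pos hpos, hneed, if_neg (by simp)]
        · rw [if_neg hpos]
    rw [hinit]
    exact ih (x :: r) _ hxr hrest'

-- ===== VERDICT (by name: the statement is the Claim_ definition above) =====
theorem solution_spec : Claim_equal_solution := by
  intro h_ _ hpre
  show solution h_ = solution_alt h_
  unfold solution solution_alt
  have := main_loop h_ [] 0 (by simp) hpre
  simpa [stackOf] using this
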